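-- pv_equiv track=rewrite | github.com/Mr-Harsh-Dixit/Project_Euler_Solutions | Python/Problem_061.py | generate_4digit
-- ===== SOURCE A (Python) =====
-- def poly(s: int, n: int) -> int:
--     # s is number of sides: 3..8
--     return ((s - 2) * n * n - (s - 4) * n) // 2
--
-- def generate_4digit(s: int) -> list[int]:
--     out = []
--     n = 1
--     while True:
--         v = poly(s, n)
--         if v > 9999:
--             break
--         if 1000 <= v <= 9999:
--             out.append(v)
--         n += 1
--     return out
-- ===== SOURCE B (Python) =====
-- def generate_4digit(s: int) -> list[int]:
--     def poly(n: int) -> int: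
--         return ((s - 2) * n * n - (s - 4) * n) // 2
--
--     # poly is strictly increasing in n for n >= 0, so the 4-digit values form a
--     # contiguous index block; find its endpoints by exponential + binary search.
--     hi = 1
--     while poly(hi) <= 9999:
--         hi *= 2
--
--     def last_le(limit: int) -> int:
--         # largest n in [0, hi] with poly(n) <= limit (poly(0) = 0 <= limit < poly(hi))
--         lo, up = 0, hi
--         while up - lo > 1:
--             mid = (lo + up) // 2
--             if poly(mid) <= limit:
--                 lo = mid
--             else:
--                 up = mid
--         return lo
--
--     n_hi = last_le(9999)
--     n_lo = last_le(999) + 1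
--     return [poly(n) for n in range(n_lo, n_hi + 1)]
-- ===== Notes on version B (the rewrite author's own statement) =====
-- stated objective: alternative
-- what changed: B replaces A's linear scan of n from 1 upward with exponential growth plus binary search (using poly's strict monotonicity) to locate the first and last 4-digit indices, then generates the block directly with one range comprehension.
import Mathlib
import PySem

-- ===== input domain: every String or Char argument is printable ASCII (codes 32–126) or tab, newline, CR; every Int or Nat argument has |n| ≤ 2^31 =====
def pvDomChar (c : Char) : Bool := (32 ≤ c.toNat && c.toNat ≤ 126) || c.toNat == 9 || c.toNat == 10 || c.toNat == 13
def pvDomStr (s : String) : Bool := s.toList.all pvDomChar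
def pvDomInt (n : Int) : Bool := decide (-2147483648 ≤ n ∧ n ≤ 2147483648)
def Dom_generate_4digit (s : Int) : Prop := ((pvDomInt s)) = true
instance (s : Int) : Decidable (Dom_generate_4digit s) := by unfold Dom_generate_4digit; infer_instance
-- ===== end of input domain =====

-- B locates the 4-digit index block by exponential + binary search instead of A's linear scan; return-value equivalence proved for all s ≥ 2 (A diverges for s ≤ 1).

-- ===== PORT A =====
def polyA (s n : Int) : Int := PySem.Int.floordiv ((s - 2) * n * n - (s - 4) * n) 2

-- fuel is only a totality guard for the 'while True' loop: for every s with 2 ≤ s the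
-- loop breaks within 10001 iterations (proved below), so 20000 is never exhausted on Pre_.
def loopA (s : Int) : Nat → Int → List Int → List Int
  | 0, _, out => out
  | fuel + 1, n, out =>
    let v := polyA s n
    if 9999 < v then out
    else loopA s fuel (n + 1) (if 1000 ≤ v ∧ v ≤ 9999 then out ++ [v] else out)

def generate_4digit (s : Int) : List Int := loopA s 20000 1 []

-- ===== PORT B =====
def polyB (s n : Int) : Int := PySem.Int.floordiv ((s - 2) * n * n - (s - 4) * n) 2

-- fuel is only a totality guard: hi doubles each step and for 2 ≤ s the loop stops
-- once hi > 9999, i.e. within 14 doublings, so 64 is never exhausted on Pre_.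
def growB (s : Int) : Nat → Int → Int
  | 0, h => h
  | f + 1, h => if polyB s h ≤ 9999 then growB s f (h * 2) else h

-- fuel is only a totality guard: the gap up - lo halves each step and starts ≤ 19998 < 2^64.
def bsearchB (s limit : Int) : Nat → Int → Int → Int
  | 0, lo, _ => lo
  | f + 1, lo, up =>
    if 1 < up - lo then
      let mid := PySem.Int.floordiv (lo + up) 2
      if polyB s mid ≤ limit then bsearchB s limit f mid up
      else bsearchB s limit f lo mid
    else lo

def generate_4digit_alt (s : Int) : List Int :=
  let hi := growB s 64 1
  let n_hi := bsearchB s 9999 64 0 hi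
  let n_lo := bsearchB s 999 64 0 hi + 1
  (PySem.List.pyRange n_lo (n_hi + 1) 1).map (polyB s)

-- ===== PRECONDITION & SPEC =====
-- Pre_ excludes exactly s ≤ 1, on which A's while loop never breaks (poly is non-increasing
-- there, so v > 9999 is never reached) and Python A diverges; B's doubling loop diverges too.
def Pre_generate_4digit (s : Int) : Prop := 2 ≤ s
instance (s : Int) : Decidable (Pre_generate_4digit s) := by unfold Pre_generate_4digit; infer_instance
def pvWitness_generate_4digit : Int := (5)

def Spec_generate_4digit (s : Int) (out : List Int) : Prop := out = generate_4digit_alt s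
instance (s : Int) (out : List Int) : Decidable (Spec_generate_4digit s out) := by unfold Spec_generate_4digit; infer_instance

-- ===== CLAIM (what is proved, stated in full; the proofs are below) =====
def Claim_equal_generate_4digit : Prop := ∀ (s : Int), Dom_generate_4digit s → Pre_generate_4digit s → Spec_generate_4digit s (generate_4digit s)

-- ===== LEMMAS AND PROOFS =====

theorem polyB_eq_polyA : polyB = polyA := rfl

theorem poly_zero (s : Int) : polyA s 0 = 0 := by
  have h : (s - 2) * 0 * 0 - (s - 4) * 0 = 0 := by ring
  simp only [polyA, h]
  rw [PySem.Int.floordiv_eq_ediv_of_pos (by norm_num)]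
  norm_num

theorem poly_succ (s n : Int) : polyA s (n + 1) = polyA s n + ((s - 2) * n + 1) := by
  simp only [polyA]
  rw [PySem.Int.floordiv_eq_ediv_of_pos (by norm_num), PySem.Int.floordiv_eq_ediv_of_pos (by norm_num)]
  have h : (s - 2) * (n + 1) * (n + 1) - (s - 4) * (n + 1)
      = ((s - 2) * n * n - (s - 4) * n) + ((s - 2) * n + 1) * 2 := by ring
  rw [h]
  omega

theorem poly_step_pos (s : Int) (hs : 2 ≤ s) {n : Int} (hn : 0 ≤ n) :
    1 ≤ (s - 2) * n + 1 := by
  have := mul_nonneg (by omega : (0:Int) ≤ s - 2) hn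
  omega

theorem poly_lt (s : Int) (hs : 2 ≤ s) {a b : Int} (ha : 0 ≤ a) (hab : a < b) :
    polyA s a < polyA s b := by
  have h : ∀ c : Int, a + 1 ≤ c → polyA s a < polyA s c := by
    intro c hc
    induction c, hc using Int.le_induction with
    | base =>
      rw [poly_succ]
      have := poly_step_pos s hs ha
      omega
    | succ m hm ih =>
      rw [poly_succ]
      have := poly_step_pos s hs (by omega : (0:Int) ≤ m)
      omega
  exact h b (by omega)

theorem poly_ge_self (s : Int) (hs : 2 ≤ s) {n : Int} (hn : 0 ≤ n) : n ≤ polyA s n := by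
  induction n, hn using Int.le_induction with
  | base => rw [poly_zero]
  | succ m hm ih =>
    rw [poly_succ]
    have := poly_step_pos s hs hm
    omega

-- a bracket polyA m ≤ L < polyA (m+1) pins down the threshold index for every n ≥ 0
theorem le_iff_of_bracket (s : Int) (hs : 2 ≤ s) {L m : Int} (hm : 0 ≤ m)
    (h1 : polyA s m ≤ L) (h2 : L < polyA s (m + 1)) :
    ∀ n, 0 ≤ n → (polyA s n ≤ L ↔ n ≤ m) := by
  intro n hn
  constructor
  · intro hle
    by_contra hgt
    have : polyA s (m + 1) ≤ polyA s n := by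
      rcases eq_or_lt_of_le (by omega : m + 1 ≤ n) with h | h
      · rw [h]
      · exact le_of_lt (poly_lt s hs (by omega) h)
    omega
  · intro hle
    rcases eq_or_lt_of_le hle with h | h
    · rw [h]; exact h1
    · exact le_of_lt (lt_of_lt_of_le (poly_lt s hs hn h) h1)

theorem grow_spec (s : Int) (hs : 2 ≤ s) :
    ∀ (f : Nat) (h : Int), 1 ≤ h → h ≤ 19998 → 9999 < 2 ^ f * h →
      1 ≤ growB s f h ∧ growB s f h ≤ 19998 ∧ 9999 < polyA s (growB s f h) := by
  intro f
  induction f with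
  | zero =>
    intro h h1 h2 h3
    simp only [growB]
    have := poly_ge_self s hs (by omega : (0:Int) ≤ h)
    simp only [pow_zero, one_mul] at h3
    exact ⟨h1, h2, by omega⟩
  | succ f ih =>
    intro h h1 h2 h3
    simp only [growB, polyB_eq_polyA]
    by_cases hc : polyA s h ≤ 9999
    · have hh : h ≤ 9999 := le_trans (poly_ge_self s hs (by omega)) hc
      rw [if_pos hc]
      refine ih (h * 2) (by omega) (by omega) ?_
      have : (2:Int) ^ (f + 1) * h = 2 ^ f * (h * 2) := by ring
      omega
    · rw [if_neg hc]
      exact ⟨h1, h2, by omega⟩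

theorem bsearch_spec (s L : Int) (hs : 2 ≤ s) :
    ∀ (f : Nat) (lo up : Int), 0 ≤ lo → lo < up → polyA s lo ≤ L → L < polyA s up →
      up - lo ≤ 2 ^ f →
      0 ≤ bsearchB s L f lo up ∧ polyA s (bsearchB s L f lo up) ≤ L ∧
        L < polyA s (bsearchB s L f lo up + 1) := by
  intro f
  induction f with
  | zero =>
    intro lo up h0 h1 h2 h3 h4
    simp only [pow_zero] at h4
    have : up = lo + 1 := by omega
    subst this
    simp only [bsearchB]
    exact ⟨h0, h2, h3⟩
  | succ f ih =>
    intro lo up h0 h1 h2 h3 h4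
    simp only [bsearchB, polyB_eq_polyA]
    by_cases hg : 1 < up - lo
    · rw [if_pos hg]
      rw [PySem.Int.floordiv_eq_ediv_of_pos (by norm_num : (0:Int) < 2)]
      have hmid1 : lo < (lo + up) / 2 := by omega
      have hmid2 : (lo + up) / 2 < up := by omega
      have hpow : (2:Int) ^ (f + 1) = 2 ^ f * 2 := by ring
      by_cases hc : polyA s ((lo + up) / 2) ≤ L
      · rw [if_pos hc]
        exact ih _ up (by omega) hmid2 hc h3 (by omega)
      · rw [if_neg hc]
        exact ih lo _ h0 hmid1 h2 (by omega) (by omega)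
    · rw [if_neg hg]
      have : up = lo + 1 := by omega
      subst this
      exact ⟨h0, h2, h3⟩

-- the A-loop from index n (given characterisations of the two thresholds M < n_lo ≤ n_hi = N)
theorem loopA_eq (s : Int) (M N : Int) (hM : 0 ≤ M)
    (hcharN : ∀ n, 0 ≤ n → (polyA s n ≤ 9999 ↔ n ≤ N))
    (hcharM : ∀ n, 0 ≤ n → (polyA s n ≤ 999 ↔ n ≤ M)) :
    ∀ (fuel : Nat) (n : Int) (acc : List Int), 1 ≤ n → (N + 2 - n).toNat ≤ fuel →
      loopA s fuel n acc = acc ++ ((PySem.List.pyRange (max n (M + 1)) (N + 1) 1).map (polyA s)) := by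
  intro fuel
  induction fuel with
  | zero =>
    intro n acc hn hf
    have hnN : N + 2 ≤ n := by omega
    rw [PySem.List.pyRange_one_eq_nil (by omega : N + 1 ≤ max n (M + 1))]
    simp [loopA]
  | succ fuel ih =>
    intro n acc hn hf
    simp only [loopA]
    by_cases hbig : 9999 < polyA s n
    · rw [if_pos hbig]
      have hnN : ¬ n ≤ N := fun h => by have := (hcharN n (by omega)).mpr h; omega
      rw [PySem.List.pyRange_one_eq_nil (by omega : N + 1 ≤ max n (M + 1))]
      simp
    · rw [if_neg hbig]
      have hnN : n ≤ N := (hcharN n (by omega)).mp (by omega)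
      have hrec := ih (n + 1) (if 1000 ≤ polyA s n ∧ polyA s n ≤ 9999 then acc ++ [polyA s n] else acc)
        (by omega) (by omega)
      rw [hrec]
      by_cases hkeep : 1000 ≤ polyA s n
      · rw [if_pos ⟨hkeep, by omega⟩]
        have hnM : ¬ n ≤ M := fun h => by have := (hcharM n (by omega)).mpr h; omega
        have hmax1 : max n (M + 1) = n := by omega
        have hmax2 : max (n + 1) (M + 1) = n + 1 := by omega
        rw [hmax1, hmax2, PySem.List.pyRange_one_cons (by omega : n < N + 1)]
        simp
      · rw [if_neg (by omega : ¬ (1000 ≤ polyA s n ∧ polyA s n ≤ 9999))]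
        have hnM : n ≤ M := (hcharM n (by omega)).mp (by omega)
        have hmax : max n (M + 1) = max (n + 1) (M + 1) := by omega
        rw [hmax]

-- ===== VERDICT (by name: the statement is the Claim_ definition above) =====
theorem generate_4digit_spec : Claim_equal_generate_4digit := by
  intro s _ hs
  unfold Spec_generate_4digit generate_4digit generate_4digit_alt
  have hgrow := grow_spec s hs 64 1 (by norm_num) (by norm_num) (by norm_num)
  set hi := growB s 64 1 with hhi
  obtain ⟨hhi1, hhi2, hhi3⟩ := hgrow
  have hbN := bsearch_spec s 9999 hs 64 0 hi (by norm_num) (by omega)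
    (by rw [poly_zero]; norm_num) hhi3 (by norm_num; omega)
  have hbM := bsearch_spec s 999 hs 64 0 hi (by norm_num) (by omega)
    (by rw [poly_zero]; norm_num) (by omega) (by norm_num; omega)
  set N := bsearchB s 9999 64 0 hi with hN
  set M := bsearchB s 999 64 0 hi with hM
  obtain ⟨hN0, hN1, hN2⟩ := hbN
  obtain ⟨hM0, hM1, hM2⟩ := hbM
  have hcharN := le_iff_of_bracket s hs hN0 hN1 hN2
  have hcharM := le_iff_of_bracket s hs hM0 hM1 hM2
  have hNle : N ≤ 9999 := by
    rcases eq_or_lt_of_le hN0 with h | h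
    · omega
    · have := poly_ge_self s hs (by omega : (0:Int) ≤ N); omega
  have hmain := loopA_eq s M N hM0 hcharN hcharM 20000 1 [] (by norm_num) (by omega)
  rw [hmain]
  have hmax : max 1 (M + 1) = M + 1 := by omega
  rw [hmax, polyB_eq_polyA]
  simp only [List.nil_append]
  rfl
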